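-- pv_equiv track=rewrite | github.com/RobertoRochaT/Rochess | tensorflow_chessbot/api_server.py | compress_fen_rank
-- ===== SOURCE A (Python) =====
-- def compress_fen_rank(rank):
--     """Compress FEN rank (111 -> 3)"""
--     compressed = []
--     empty_count = 0
--     for char in rank:
--         if char == '1':
--             empty_count += 1
--         else:
--             if empty_count > 0:
--                 compressed.append(str(empty_count))
--                 empty_count = 0
--             compressed.append(char)
--     if empty_count > 0:
--         compressed.append(str(empty_count))
--     return ''.join(compressed)
-- ===== SOURCE B (Python) =====
-- def compress_fen_rank(rank):
--     """Compress FEN rank (111 -> 3)"""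
--     out = []
--     i = 0
--     n = len(rank)
--     while i < n:
--         if rank[i] == '1':
--             j = i
--             while j < n and rank[j] == '1':
--                 j += 1
--             out.append(str(j - i))
--             i = j
--         else:
--             out.append(rank[i])
--             i += 1
--     return ''.join(out)
-- ===== Notes on version B (the rewrite author's own statement) =====
-- stated objective: alternative
-- what changed: Replaces A's running-counter state machine (increment on each empty-square digit, flush the pending count before each piece character and once more after the loop) with a two-pointer run scan: at each empty-square digit an inner scan finds the whole run and emits its length at once, so there is no carried counter and no post-loop flush.
import Mathlib
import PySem

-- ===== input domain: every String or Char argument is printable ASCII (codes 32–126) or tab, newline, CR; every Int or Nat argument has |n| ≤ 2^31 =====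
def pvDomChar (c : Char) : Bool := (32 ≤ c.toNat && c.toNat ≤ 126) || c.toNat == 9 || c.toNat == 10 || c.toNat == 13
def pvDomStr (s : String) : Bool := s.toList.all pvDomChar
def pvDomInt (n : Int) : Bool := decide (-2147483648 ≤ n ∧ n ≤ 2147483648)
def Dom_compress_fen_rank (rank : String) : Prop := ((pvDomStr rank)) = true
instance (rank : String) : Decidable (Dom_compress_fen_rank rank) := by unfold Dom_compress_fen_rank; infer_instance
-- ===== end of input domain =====

-- B replaces A's running-counter state machine with a two-pointer run scan (same O(n) cost, no carried counter).

-- ===== PORT A =====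
-- one loop step: state = (compressed, empty_count)
def aStep (st : List String × Int) (c : Char) : List String × Int :=
  if c == '1' then (st.1, st.2 + 1)
  else
    let comp := if st.2 > 0 then st.1 ++ [PySem.Int.toStr st.2] else st.1
    (comp ++ [String.singleton c], 0)

def compress_fen_rank (rank : String) : String :=
  let st := rank.toList.foldl aStep ([], 0)
  let compressed := if st.2 > 0 then st.1 ++ [PySem.Int.toStr st.2] else st.1
  PySem.Str.join "" compressed

-- ===== PORT B =====
-- inner while loop: advance j over the run of '1's
def bRun (cs : List Char) (j : Nat) : Nat :=
  if h : j < cs.length then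
    if cs[j] == '1' then bRun cs (j + 1) else j
  else j
termination_by cs.length - j

-- needed by bGo's termination: the inner scan strictly advances past a '1'
theorem le_bRun (cs : List Char) (j : Nat) : j ≤ bRun cs j := by
  fun_induction bRun cs j with
  | case1 h h1 ih => omega
  | case2 h h1 => omega
  | case3 h => omega

theorem lt_bRun (cs : List Char) (i : Nat) (h : i < cs.length) (h1 : cs[i] == '1') :
    i < bRun cs i := by
  rw [bRun]
  simp only [h, dif_pos, h1, if_pos]
  have := le_bRun cs (i + 1)
  omega

-- outer while loop over the index i, accumulating output pieces
def bGo (cs : List Char) (i : Nat) (out : List String) : List String :=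
  if h : i < cs.length then
    if h1 : cs[i] == '1' then
      let j := bRun cs i
      bGo cs j (out ++ [PySem.Int.toStr ((j - i : Nat) : Int)])
    else bGo cs (i + 1) (out ++ [String.singleton cs[i]])
  else out
termination_by cs.length - i
decreasing_by
  · have := lt_bRun cs i h h1; omega
  · omega

def compress_fen_rank_alt (rank : String) : String :=
  PySem.Str.join "" (bGo rank.toList 0 [])

-- ===== PRECONDITION & SPEC =====
def Spec_compress_fen_rank (rank : String) (out : String) : Prop := out = compress_fen_rank_alt rank
instance (rank : String) (out : String) : Decidable (Spec_compress_fen_rank rank out) := by unfold Spec_compress_fen_rank; infer_instance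

-- ===== CLAIM (what is proved, stated in full; the proofs are below) =====
def Claim_equal_compress_fen_rank : Prop := ∀ (rank : String), Dom_compress_fen_rank rank → Spec_compress_fen_rank rank (compress_fen_rank rank)

-- ===== LEMMAS AND PROOFS =====

-- common reference: the output pieces (as char lists), consuming one run at a time
def altGo : List Char → List (List Char)
  | [] => []
  | c :: cs =>
    if c = '1' then
      PySem.Int.toChars ((1 + (cs.takeWhile (· = '1')).length : Nat) : Int)
        :: altGo (cs.dropWhile (· = '1'))
    else [c] :: altGo cs
termination_by cs => cs.length
decreasing_by
  · have := List.length_dropWhile_le (p := (· = '1')) (l := cs); simpa using Nat.lt_succ_of_le this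
  · simp

theorem bRun_eq (cs : List Char) (j : Nat) :
    bRun cs j = j + ((cs.drop j).takeWhile (· = '1')).length := by
  fun_induction bRun cs j with
  | case1 j h h1 ih =>
    rw [List.drop_eq_getElem_cons h]
    simp only [beq_iff_eq] at h1
    simp [List.takeWhile_cons, h1, ih]
    omega
  | case2 j h h1 =>
    rw [List.drop_eq_getElem_cons h]
    simp only [beq_iff_eq] at h1
    simp [List.takeWhile_cons, h1]
  | case3 j h =>
    have : cs.drop j = [] := List.drop_eq_nil_of_le (by omega)
    simp [this]

theorem dropWhile_eq_drop_takeWhile (p : Char → Bool) (l : List Char) :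
    l.dropWhile p = l.drop (l.takeWhile p).length := by
  induction l with
  | nil => simp
  | cons c cs ih =>
    by_cases hc : p c
    · simp [List.dropWhile_cons, List.takeWhile_cons, hc, ih]
    · simp [List.dropWhile_cons, List.takeWhile_cons, hc]

theorem bRun_le (cs : List Char) (j : Nat) (h : j ≤ cs.length) : bRun cs j ≤ cs.length := by
  rw [bRun_eq]
  have h1 := (List.takeWhile_sublist (l := cs.drop j) (· = '1')).length_le
  have h2 : (cs.drop j).length = cs.length - j := List.length_drop ..
  omega

theorem bGo_spec (cs : List Char) (i : Nat) (out : List String) (hi : i ≤ cs.length) :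
    (bGo cs i out).map String.toList = out.map String.toList ++ altGo (cs.drop i) := by
  fun_induction bGo cs i out with
  | case1 i out h h1 j ih =>
    have hj_le : j ≤ cs.length := bRun_le cs i (le_of_lt h)
    have hbr : j = i + ((cs.drop i).takeWhile (· = '1')).length := bRun_eq cs i
    have hc1 : cs[i] = '1' := by simpa using h1
    have hdrop : cs.drop i = '1' :: cs.drop (i + 1) := by
      rw [List.drop_eq_getElem_cons h, hc1]
    rw [ih hj_le, List.map_append, List.append_assoc]
    congr 1
    rw [hdrop] at hbr
    have ht : (('1' :: cs.drop (i+1)).takeWhile (· = '1')) = '1' :: ((cs.drop (i+1)).takeWhile (· = '1')) := by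
      simp
    rw [ht, List.length_cons] at hbr
    have ht2 : j - i = 1 + ((cs.drop (i+1)).takeWhile (· = '1')).length := by omega
    have hdw : (cs.drop (i+1)).dropWhile (· = '1') = cs.drop j := by
      rw [dropWhile_eq_drop_takeWhile, List.drop_drop]
      congr 1
      omega
    rw [hdrop, altGo, if_pos rfl, hdw, ht2]
    simp [PySem.Int.toList_toStr]
  | case2 i out h h1 ih =>
    have hc1 : ¬ cs[i] = '1' := by simpa using h1
    have hdrop : cs.drop i = cs[i] :: cs.drop (i + 1) := List.drop_eq_getElem_cons h
    rw [ih (by omega), List.map_append, List.append_assoc]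
    congr 1
    rw [hdrop, altGo, if_neg hc1]
    simp [String.singleton]
  | case3 i out h =>
    have : i = cs.length := by omega
    simp [this, List.drop_length, altGo]

-- A's pending-counter information, as the pieces still to be produced
def emit (ec : Nat) (cs : List Char) : List (List Char) :=
  (if ec + (cs.takeWhile (· = '1')).length > 0 then
      [PySem.Int.toChars ((ec + (cs.takeWhile (· = '1')).length : Nat) : Int)]
    else [])
    ++ altGo (cs.dropWhile (· = '1'))

theorem emit_zero (cs : List Char) : emit 0 cs = altGo cs := by
  cases cs with
  | nil => simp [emit, altGo]
  | cons c cs =>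
    by_cases hc : c = '1'
    · simp [emit, altGo, hc]
      ring_nf
    · simp [emit, altGo, hc]

def aFin (st : List String × Int) : List String :=
  if st.2 > 0 then st.1 ++ [PySem.Int.toStr st.2] else st.1

theorem aInv (cs : List Char) (comp : List String) (ec : Nat) :
    (aFin (cs.foldl aStep (comp, (ec : Int)))).map String.toList
      = comp.map String.toList ++ emit ec cs := by
  induction cs generalizing comp ec with
  | nil =>
    by_cases h : 0 < ec
    · simp [aFin, emit, altGo, h, PySem.Int.toList_toStr]
    · simp [aFin, emit, altGo, h]
  | cons c cs ih =>
    rw [List.foldl_cons]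
    by_cases hc : c = '1'
    · have hstep : aStep (comp, (ec : Int)) c = (comp, ((ec + 1 : Nat) : Int)) := by
        simp [aStep, hc]
      rw [hstep, ih]
      congr 1
      subst hc
      unfold emit
      have h1 : (('1' :: cs).takeWhile (· = '1')) = '1' :: cs.takeWhile (· = '1') := by simp
      have h2 : (('1' :: cs).dropWhile (· = '1')) = cs.dropWhile (· = '1') := by simp
      rw [h1, h2, List.length_cons]
      have e1 : ec + ((cs.takeWhile (· = '1')).length + 1)
          = (ec + 1) + (cs.takeWhile (· = '1')).length := by omega
      rw [e1]
    · have hstep : aStep (comp, (ec : Int)) c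
          = ((if 0 < ec then comp ++ [PySem.Int.toStr (ec : Int)] else comp)
              ++ [String.singleton c], ((0 : Nat) : Int)) := by
        by_cases h : 0 < ec <;> simp [aStep, hc, h]
      rw [hstep, ih, emit_zero]
      unfold emit
      have h1 : ((c :: cs).takeWhile (· = '1')) = [] := by simp [hc]
      have h2 : ((c :: cs).dropWhile (· = '1')) = c :: cs := by simp [hc]
      rw [h1, h2, altGo, if_neg hc]
      by_cases h : 0 < ec
      · simp [h, PySem.Int.toList_toStr, String.singleton]
      · simp [h, String.singleton]

-- ===== VERDICT (by name: the statement is the Claim_ definition above) =====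
theorem compress_fen_rank_spec : Claim_equal_compress_fen_rank := by
  intro rank _
  unfold Spec_compress_fen_rank compress_fen_rank compress_fen_rank_alt
  apply String.toList_inj.mp
  rw [PySem.Str.toList_join, PySem.Str.toList_join]
  congr 1
  have hA := aInv rank.toList [] 0
  have hB := bGo_spec rank.toList 0 [] (Nat.zero_le _)
  simp only [Nat.cast_zero, List.map_nil, List.nil_append, List.drop_zero, emit_zero] at hA hB
  rw [hB, ← hA]
  rfl
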